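-- pv_equiv track=rewrite | github.com/matt-j-harvey/Widefield_Analysis | Behaviour_Analysis/Behaviour_Utils.py | get_step_onsets
-- ===== SOURCE A (Python) =====
-- def get_step_onsets(trace, threshold=1, window=3):
--     state = 0
--     number_of_timepoints = len(trace)
--     onset_times = []
--     time_below_threshold = 0
--
--     onset_line = []
--
--     for timepoint in range(number_of_timepoints):
--         if state == 0:
--             if trace[timepoint] > threshold:
--                 state = 1
--                 onset_times.append(timepoint)
--                 time_below_threshold = 0
--             else:
--                 pass
--         elif state == 1:
--             if trace[timepoint] > threshold:
--                 time_below_threshold = 0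
--             else:
--                 time_below_threshold += 1
--                 if time_below_threshold > window:
--                     state = 0
--                     time_below_threshold = 0
--         onset_line.append(state)
--
--     return onset_times
-- ===== SOURCE B (Python) =====
-- def get_step_onsets(trace, threshold=1, window=3):
--     # Run-length segmentation: stage 1 collapses the trace into maximal runs
--     # of same-side-of-threshold samples; stage 2 walks the runs with an
--     # `active` flag, recording each run start that begins a new event and
--     # deactivating only after a below-threshold run strictly longer than
--     # `window` samples.
--     runs = []  # (above, start_index, length)
--     i = 0
--     while i < len(trace):
--         above = trace[i] > threshold
--         j = i + 1
--         while j < len(trace) and (trace[j] > threshold) == above: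
--             j += 1
--         runs.append((above, i, j - i))
--         i = j
--
--     onset_times = []
--     active = False
--     for above, start, length in runs:
--         if above:
--             if not active:
--                 onset_times.append(start)
--                 active = True
--         elif length > window:
--             active = False
--     return onset_times
-- ===== Notes on version B (the rewrite author's own statement) =====
-- stated objective: alternative
-- what changed: Replaced A's per-timepoint 0/1 state machine (state and time_below_threshold updated at every index) by a two-stage run-length segmentation: first collapse the trace into maximal runs of same-side-of-threshold samples, then walk the run list with an active flag, recording each run start that begins a new event and deactivating only after a below-threshold run strictly longer than window.
import Mathlib
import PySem

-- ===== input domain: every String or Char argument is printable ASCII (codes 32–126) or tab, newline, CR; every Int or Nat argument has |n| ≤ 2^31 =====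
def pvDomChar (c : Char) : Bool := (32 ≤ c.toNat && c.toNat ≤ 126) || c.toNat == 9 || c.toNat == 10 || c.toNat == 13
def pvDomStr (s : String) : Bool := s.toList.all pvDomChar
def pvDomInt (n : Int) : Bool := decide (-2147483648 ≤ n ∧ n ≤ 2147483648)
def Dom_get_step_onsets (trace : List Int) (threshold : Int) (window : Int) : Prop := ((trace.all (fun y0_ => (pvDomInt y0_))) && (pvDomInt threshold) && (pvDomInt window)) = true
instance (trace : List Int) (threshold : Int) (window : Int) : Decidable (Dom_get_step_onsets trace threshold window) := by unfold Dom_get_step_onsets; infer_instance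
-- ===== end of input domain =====

-- B replaces A's per-timepoint 0/1 state machine by a two-stage run-length
-- segmentation: collapse the trace into maximal same-side-of-threshold runs,
-- then walk the run list with an active flag; objective: alternative.

-- ===== PORT A =====
-- one step of A's loop body; the state tuple is (state, onset_times, time_below_threshold, onset_line)
def stepA (threshold window : Int) (s : Int × List Int × Int × List Int) (timepoint : Int)
    (value : Int) : Int × List Int × Int × List Int :=
  let s' :=
    if s.1 = 0 then
      if value > threshold then (1, s.2.1 ++ [timepoint], 0, s.2.2.2)
      else s
    else if s.1 = 1 then
      if value > threshold then (s.1, s.2.1, 0, s.2.2.2)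
      else
        let t := s.2.2.1 + 1
        if t > window then (0, s.2.1, 0, s.2.2.2)
        else (s.1, s.2.1, t, s.2.2.2)
    else s
  (s'.1, s'.2.1, s'.2.2.1, s'.2.2.2 ++ [s'.1])   -- onset_line.append(state)

def get_step_onsets (trace : List Int) (threshold : Int) (window : Int) : List Int :=
  let number_of_timepoints : Int := (trace.length : Int)
  let r := (PySem.List.pyRange 0 number_of_timepoints 1).foldl
    (fun s timepoint => stepA threshold window s timepoint (PySem.List.pyGetD trace timepoint 0))
    (0, [], 0, [])
  r.2.1

-- ===== PORT B =====
-- Source B's inner while loop (advance j while the key stays equal): on the suffix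
-- after position i it returns (run-group, remaining suffix); the group's length
-- is Source B's j - i - 1 extra matches.
def pvTakeRun (threshold : Int) (b : Bool) : List Int → List Int × List Int
  | [] => ([], [])
  | x :: xs =>
    if decide (x > threshold) = b then
      let p := pvTakeRun threshold b xs
      (x :: p.1, p.2)
    else ([], x :: xs)

theorem pvTakeRun_len (threshold : Int) (b : Bool) (xs : List Int) :
    (pvTakeRun threshold b xs).2.length ≤ xs.length := by
  induction xs with
  | nil => simp [pvTakeRun]
  | cons x xs ih =>
    simp only [pvTakeRun]
    split
    · exact Nat.le_succ_of_le ih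
    · simp

-- Source B's outer while loop (stage 1): the list of maximal runs (above, start, length)
def pvRuns (threshold : Int) : List Int → Int → List (Bool × Int × Int)
  | [], _ => []
  | x :: xs, i =>
    let b := decide (x > threshold)
    let p := pvTakeRun threshold b xs
    (b, i, ((p.1.length : Int) + 1)) :: pvRuns threshold p.2 (i + (p.1.length : Int) + 1)
  termination_by xs => xs.length
  decreasing_by simpa using Nat.lt_succ_of_le (pvTakeRun_len threshold _ xs)

-- stage 2: walk the runs with state (onset_times, active)
def get_step_onsets_alt (trace : List Int) (threshold : Int) (window : Int) : List Int :=
  ((pvRuns threshold trace 0).foldl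
    (fun s r =>
      if r.1 then (if s.2 then s else (s.1 ++ [r.2.1], true))
      else (s.1, if r.2.2 > window then false else s.2))
    (([] : List Int), false)).1

-- ===== PRECONDITION & SPEC =====
def Spec_get_step_onsets (trace : List Int) (threshold : Int) (window : Int) (out : List Int) : Prop := out = get_step_onsets_alt trace threshold window
instance (trace : List Int) (threshold : Int) (window : Int) (out : List Int) : Decidable (Spec_get_step_onsets trace threshold window out) := by unfold Spec_get_step_onsets; infer_instance

-- ===== CLAIM (what is proved, stated in full; the proofs are below) =====
def Claim_equal_get_step_onsets : Prop := ∀ (trace : List Int) (threshold : Int) (window : Int), Dom_get_step_onsets trace threshold window → Spec_get_step_onsets trace threshold window (get_step_onsets trace threshold window)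

-- ===== LEMMAS AND PROOFS =====

-- intermediate characterisation of A's state machine, used on both sides of the proof
mutual
def altIdle (threshold window : Int) : List Int → Int → List Int
  | [], _ => []
  | x :: xs, i =>
    if x ≤ threshold then altIdle threshold window xs (i + 1)
    else i :: altActive threshold window xs (i + 1) 0
def altActive (threshold window : Int) : List Int → Int → Int → List Int
  | [], _, _ => []
  | x :: xs, i, run =>
    if x > threshold then altActive threshold window xs (i + 1) 0
    else
      if run + 1 > window then altIdle threshold window xs (i + 1)
      else altActive threshold window xs (i + 1) (run + 1)
end

-- A's fold over any suffix, started in state 0 resp. state 1, yields the idle resp. active scan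
theorem foldA_idle_active (threshold window : Int) (xs : List Int) :
    ∀ (i : Int) (acc : List Int) (tbt : Int) (line : List Int),
      ((PySem.List.enumerate xs i).foldl
          (fun s p => stepA threshold window s p.1 p.2) (0, acc, tbt, line)).2.1
        = acc ++ altIdle threshold window xs i
      ∧
      ((PySem.List.enumerate xs i).foldl
          (fun s p => stepA threshold window s p.1 p.2) (1, acc, tbt, line)).2.1
        = acc ++ altActive threshold window xs i tbt := by
  induction xs with
  | nil => intro i acc tbt line; simp [PySem.List.enumerate, altIdle, altActive]
  | cons x xs ih =>
    intro i acc tbt line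
    rw [PySem.List.enumerate_cons]
    refine ⟨?_, ?_⟩
    · rw [List.foldl_cons]; dsimp only
      by_cases hx : x > threshold
      · rw [show stepA threshold window (0, acc, tbt, line) i x
            = (1, acc ++ [i], 0, line ++ [1]) from by simp [stepA, hx]]
        simp only [altIdle]
        rw [if_neg (by omega)]
        rw [(ih (i + 1) (acc ++ [i]) 0 (line ++ [1])).2]
        simp
      · rw [show stepA threshold window (0, acc, tbt, line) i x
            = (0, acc, tbt, line ++ [0]) from by simp [stepA, hx]]
        simp only [altIdle]
        rw [if_pos (by omega)]
        exact (ih (i + 1) acc tbt (line ++ [0])).1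
    · rw [List.foldl_cons]; dsimp only
      by_cases hx : x > threshold
      · rw [show stepA threshold window (1, acc, tbt, line) i x
            = (1, acc, 0, line ++ [1]) from by simp [stepA, hx]]
        simp only [altActive]
        rw [if_pos hx]
        exact (ih (i + 1) acc 0 (line ++ [1])).2
      · by_cases ht : tbt + 1 > window
        · rw [show stepA threshold window (1, acc, tbt, line) i x
              = (0, acc, 0, line ++ [0]) from by simp [stepA, hx, show window ≤ tbt from by omega]]
          simp only [altActive]
          rw [if_neg hx, if_pos ht]
          exact (ih (i + 1) acc 0 (line ++ [0])).1
        · rw [show stepA threshold window (1, acc, tbt, line) i x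
              = (1, acc, tbt + 1, line ++ [1]) from by simp [stepA, hx, show ¬ window ≤ tbt from by omega]]
          simp only [altActive]
          rw [if_neg hx, if_neg ht]
          exact (ih (i + 1) acc (tbt + 1) (line ++ [1])).2

-- every pair produced by enumerate lies between the start index and start + length
theorem mem_enumerate_bounds {xs : List Int} {s : Int} {p : Int × Int}
    (h : p ∈ PySem.List.enumerate xs s) : s ≤ p.1 ∧ p.1 < s + xs.length := by
  have hm : p.1 ∈ (PySem.List.enumerate xs s).map (fun q => q.1) := List.mem_map_of_mem h
  rw [PySem.List.map_fst_enumerate xs s] at hm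
  exact PySem.List.mem_pyRange_one.mp hm

-- every pair produced by enumerate reads the underlying list at its own index
theorem pyGetD_of_mem_enumerate (xs : List Int) (d : Int) :
    ∀ (k : Nat) (p : Int × Int), p ∈ PySem.List.enumerate xs (k : Int) →
      PySem.List.pyGetD xs (p.1 - k) d = p.2 := by
  induction xs with
  | nil => intro k p hp; simp [PySem.List.enumerate] at hp
  | cons x xs ih =>
    intro k p hp
    rw [PySem.List.enumerate_cons] at hp
    rcases List.mem_cons.mp hp with h | h
    · subst h
      have h0 : ((k : Int) - k) = 0 := by ring
      rw [h0, PySem.List.pyGetD_eq_getElem (x :: xs) d le_rfl (by simp)]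
      simp
    · have hk : ((k : Int) + 1) = ((k + 1 : Nat) : Int) := by push_cast; ring
      rw [hk] at h
      have h2 := ih (k + 1) p h
      obtain ⟨hge, hlt0⟩ := mem_enumerate_bounds h
      have hlt : p.1 - k < ((x :: xs).length : Int) := by simp; push_cast at hge hlt0 ⊢; omega
      have hge' : (0:Int) ≤ p.1 - (k+1:Nat) := by push_cast at hge ⊢; omega
      rw [PySem.List.pyGetD_eq_getElem (x :: xs) d (by push_cast at hge ⊢; omega) hlt]
      rw [PySem.List.pyGetD_eq_getElem xs d hge' (by push_cast at hlt0 ⊢; omega)] at h2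
      have hidx : (p.1 - (k : Int)).toNat = (p.1 - ((k+1 : Nat) : Int)).toNat + 1 := by
        push_cast at hge ⊢; omega
      simp only [hidx, List.getElem_cons_succ]
      exact h2

-- A equals the intermediate scan
theorem A_eq_idle (trace : List Int) (threshold window : Int) :
    get_step_onsets trace threshold window = altIdle threshold window trace 0 := by
  unfold get_step_onsets
  dsimp only
  have hrange : PySem.List.pyRange 0 (trace.length : Int) 1
      = (PySem.List.enumerate trace 0).map (fun p => p.1) := by
    rw [PySem.List.map_fst_enumerate trace 0]; norm_num
  rw [hrange, List.foldl_map]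
  rw [PySem.List.foldl_congr_mem _ _ (fun s p => stepA threshold window s p.1 p.2) _
    (by
      intro acc p hp
      have := pyGetD_of_mem_enumerate trace 0 0 p (by simpa using hp)
      simp only [Int.sub_zero, Nat.cast_zero] at this
      rw [this])]
  simpa using (foldA_idle_active threshold window trace 0 [] 0 []).1

-- structural facts about pvTakeRun
theorem pvTakeRun_append (threshold : Int) (b : Bool) (xs : List Int) :
    (pvTakeRun threshold b xs).1 ++ (pvTakeRun threshold b xs).2 = xs := by
  induction xs with
  | nil => simp [pvTakeRun]
  | cons x xs ih =>
    simp only [pvTakeRun]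
    split
    · simpa using ih
    · simp

theorem pvTakeRun_grp (threshold : Int) (b : Bool) (xs : List Int) :
    ∀ y ∈ (pvTakeRun threshold b xs).1, decide (y > threshold) = b := by
  induction xs with
  | nil => simp [pvTakeRun]
  | cons x xs ih =>
    simp only [pvTakeRun]
    split
    · rename_i h
      intro y hy
      rcases List.mem_cons.mp hy with rfl | hy
      · exact h
      · exact ih y hy
    · simp

theorem pvTakeRun_rest (threshold : Int) (b : Bool) (xs : List Int) :
    (pvTakeRun threshold b xs).2 = [] ∨
      ∃ z zs, (pvTakeRun threshold b xs).2 = z :: zs ∧ decide (z > threshold) ≠ b := by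
  induction xs with
  | nil => simp [pvTakeRun]
  | cons x xs ih =>
    simp only [pvTakeRun]
    split
    · exact ih
    · rename_i h
      exact Or.inr ⟨x, xs, rfl, h⟩

-- the idle scan skips a block of below-threshold samples
theorem idle_skip (threshold window : Int) (ys : List Int)
    (hys : ∀ y ∈ ys, y ≤ threshold) :
    ∀ (rest : List Int) (j : Int),
      altIdle threshold window (ys ++ rest) j = altIdle threshold window rest (j + ys.length) := by
  induction ys with
  | nil => intro rest j; simp
  | cons y ys ih =>
    intro rest j
    simp only [List.cons_append, altIdle]
    rw [if_pos (hys y (List.mem_cons_self))]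
    rw [ih (fun z hz => hys z (List.mem_cons_of_mem _ hz)) rest (j + 1)]
    congr 1
    simp only [List.length_cons]; push_cast; ring

-- the active scan skips a block of above-threshold samples, resetting the counter
theorem active_skip (threshold window : Int) (ys : List Int)
    (hys : ∀ y ∈ ys, y > threshold) :
    ∀ (rest : List Int) (j r : Int),
      altActive threshold window (ys ++ rest) j r
        = altActive threshold window rest (j + ys.length) (if ys = [] then r else 0) := by
  induction ys with
  | nil => intro rest j r; simp
  | cons y ys ih =>
    intro rest j r
    simp only [List.cons_append, altActive]
    rw [if_pos (hys y (List.mem_cons_self))]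
    rw [ih (fun z hz => hys z (List.mem_cons_of_mem _ hz)) rest (j + 1) 0]
    have : (j + 1 + (ys.length : Int)) = j + ((y :: ys).length : Int) := by
      simp only [List.length_cons]; push_cast; ring
    rw [this]
    split <;> simp

-- the active scan through a block of below-threshold samples: breaks to idle iff the
-- counter plus the block length exceeds window
theorem active_below (threshold window : Int) (ys : List Int)
    (hys : ∀ y ∈ ys, y ≤ threshold) :
    ∀ (rest : List Int) (j r : Int), r ≤ window ∨ ys ≠ [] →
      altActive threshold window (ys ++ rest) j r
        = if r + ys.length > window then altIdle threshold window rest (j + ys.length)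
          else altActive threshold window rest (j + ys.length) (r + ys.length) := by
  induction ys with
  | nil =>
    intro rest j r hr
    rcases hr with hr | hr
    · simp [not_lt.mpr hr]
    · simp at hr
  | cons y ys ih =>
    intro rest j r _
    simp only [List.cons_append, altActive]
    rw [if_neg (by exact not_lt.mpr (hys y (List.mem_cons_self)))]
    have hys' : ∀ z ∈ ys, z ≤ threshold := fun z hz => hys z (List.mem_cons_of_mem _ hz)
    have hlen : (0:Int) ≤ ys.length := by positivity
    by_cases hb : r + 1 > window
    · rw [if_pos hb]
      rw [idle_skip threshold window ys hys' rest (j + 1)]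
      rw [if_pos (by simp only [List.length_cons]; push_cast; omega)]
      congr 1; simp only [List.length_cons]; push_cast; ring
    · rw [if_neg hb]
      rw [ih hys' rest (j + 1) (r + 1) (Or.inl (by omega))]
      have h1 : (j + 1 + (ys.length : Int)) = j + ((y :: ys).length : Int) := by
        simp only [List.length_cons]; push_cast; ring
      have h2 : (r + 1 + (ys.length : Int)) = r + ((y :: ys).length : Int) := by
        simp only [List.length_cons]; push_cast; ring
      rw [h1, h2]

-- at a run boundary the pending counter is irrelevant (the rest is empty or above-threshold)
theorem active_boundary (threshold window : Int) (rest : List Int)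
    (h : rest = [] ∨ ∃ z zs, rest = z :: zs ∧ z > threshold) (j r r' : Int) :
    altActive threshold window rest j r = altActive threshold window rest j r' := by
  rcases h with rfl | ⟨z, zs, rfl, hz⟩
  · rfl
  · simp only [altActive, if_pos hz]

-- the run walk with state (acc, false) resp. (acc, true) equals the idle resp. active scan
theorem runs_walk (threshold window : Int) :
    ∀ (n : Nat) (xs : List Int), xs.length ≤ n → ∀ (i : Int) (acc : List Int),
      (((pvRuns threshold xs i).foldl
          (fun s r =>
            if r.1 then (if s.2 then s else (s.1 ++ [r.2.1], true))
            else (s.1, if r.2.2 > window then false else s.2))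
          (acc, false)).1 = acc ++ altIdle threshold window xs i)
      ∧
      (((pvRuns threshold xs i).foldl
          (fun s r =>
            if r.1 then (if s.2 then s else (s.1 ++ [r.2.1], true))
            else (s.1, if r.2.2 > window then false else s.2))
          (acc, true)).1 = acc ++ altActive threshold window xs i 0) := by
  intro n
  induction n with
  | zero =>
    intro xs hxs i acc
    have : xs = [] := List.eq_nil_of_length_eq_zero (Nat.le_zero.mp hxs)
    subst this
    simp [pvRuns, altIdle, altActive]
  | succ n ih =>
    intro xs hxs i acc
    match xs with
    | [] => simp [pvRuns, altIdle, altActive]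
    | x :: xs' =>
      rw [show pvRuns threshold (x :: xs') i
          = (decide (x > threshold), i,
              (((pvTakeRun threshold (decide (x > threshold)) xs').1.length : Int) + 1)) ::
            pvRuns threshold (pvTakeRun threshold (decide (x > threshold)) xs').2
              (i + ((pvTakeRun threshold (decide (x > threshold)) xs').1.length : Int) + 1)
          from by rw [pvRuns]]
      set b := decide (x > threshold) with hb
      set grp := (pvTakeRun threshold b xs').1 with hgrp
      set rest := (pvTakeRun threshold b xs').2 with hrest
      have hsplit : grp ++ rest = xs' := pvTakeRun_append threshold b xs'
      have hrestlen : rest.length ≤ n := by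
        rw [hrest]
        have h1 := pvTakeRun_len threshold b xs'
        simp only [List.length_cons] at hxs
        omega
      have hgrpkey := pvTakeRun_grp threshold b xs'
      have hbound := pvTakeRun_rest threshold b xs'
      by_cases hx : x > threshold
      · have hbT : b = true := by simp [hb, hx]
        have hgrpAbove : ∀ y ∈ grp, y > threshold := by
          intro y hy
          have := hgrpkey y hy
          rw [hbT] at this; simpa using this
        constructor
        · -- idle side: onset recorded at i, then active through the run
          rw [List.foldl_cons]
          simp only [hbT, Bool.false_eq_true, reduceIte]
          rw [(ih rest hrestlen (i + (grp.length : Int) + 1) (acc ++ [i])).2]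
          simp only [altIdle, if_neg (not_le.mpr hx)]
          rw [← hsplit]
          rw [active_skip threshold window grp hgrpAbove rest (i + 1) 0]
          simp only [ite_self]
          rw [show (i + 1 + (grp.length : Int)) = i + (grp.length : Int) + 1 by ring]
          simp
        · -- active side: run is above, flag stays, counter resets
          rw [List.foldl_cons]
          simp only [hbT, reduceIte]
          rw [(ih rest hrestlen (i + (grp.length : Int) + 1) acc).2]
          simp only [altActive, if_pos hx]
          rw [← hsplit]
          rw [active_skip threshold window grp hgrpAbove rest (i + 1) 0]
          simp only [ite_self]
          rw [show (i + 1 + (grp.length : Int)) = i + (grp.length : Int) + 1 by ring]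
      · have hbF : b = false := by simp [hb, hx]
        have hgrpBelow : ∀ y ∈ grp, y ≤ threshold := by
          intro y hy
          have := hgrpkey y hy
          rw [hbF] at this
          simpa using of_decide_eq_false this
        have hRun : ∀ j : Int,
            altIdle threshold window ((x :: grp) ++ rest) j
              = altIdle threshold window rest (j + (grp.length : Int) + 1) := by
          intro j
          rw [idle_skip threshold window (x :: grp)
            (by
              intro z hz
              rcases List.mem_cons.mp hz with rfl | hz
              · omega
              · exact hgrpBelow z hz) rest j]
          congr 1; simp only [List.length_cons]; push_cast; ring
        constructor
        · -- idle side: below run is skipped, flag stays false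
          rw [List.foldl_cons]
          simp only [hbF, Bool.false_eq_true, reduceIte]
          simp only [ite_self]
          rw [(ih rest hrestlen (i + (grp.length : Int) + 1) acc).1]
          have : x :: xs' = (x :: grp) ++ rest := by simp [hsplit]
          rw [this, hRun i]
        · -- active side: counter runs through the below block
          rw [List.foldl_cons]
          simp only [hbF, Bool.false_eq_true, reduceIte]
          have hxsplit : x :: xs' = (x :: grp) ++ rest := by simp [hsplit]
          rw [hxsplit]
          rw [active_below threshold window (x :: grp)
            (by
              intro z hz
              rcases List.mem_cons.mp hz with rfl | hz
              · omega
              · exact hgrpBelow z hz) rest i 0 (Or.inr (by simp))]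
          have hlen : ((x :: grp).length : Int) = (grp.length : Int) + 1 := by
            simp only [List.length_cons]; push_cast; ring
          by_cases hw : (grp.length : Int) + 1 > window
          · rw [if_pos (by omega)]
            rw [if_pos (by simpa using hw)]
            rw [(ih rest hrestlen (i + (grp.length : Int) + 1) acc).1]
            rw [hlen, show i + ((grp.length : Int) + 1) = i + (grp.length : Int) + 1 by ring]
          · rw [if_neg (by omega)]
            rw [if_neg (by simpa using hw)]
            rw [(ih rest hrestlen (i + (grp.length : Int) + 1) acc).2]
            rw [hlen, show i + ((grp.length : Int) + 1) = i + (grp.length : Int) + 1 by ring]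
            congr 1
            exact active_boundary threshold window rest
              (by
                rcases hbound with h | ⟨z, zs, hz, hkey⟩
                · exact Or.inl h
                · refine Or.inr ⟨z, zs, hz, ?_⟩
                  rw [hbF] at hkey
                  exact of_decide_eq_true (Bool.of_not_eq_false (by simpa using hkey)))
              _ _ _

-- ===== VERDICT (by name: the statement is the Claim_ definition above) =====
theorem get_step_onsets_spec : Claim_equal_get_step_onsets := by
  intro trace threshold window _
  unfold Spec_get_step_onsets get_step_onsets_alt
  rw [A_eq_idle]
  exact ((runs_walk threshold window trace.length trace le_rfl 0 []).1).symm
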